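-- pv_equiv track=rewrite | github.com/Joedom971/cyber-job-hunter | src/scrapers/easi.py | _pick_primary_location
-- ===== SOURCE A (Python) =====
-- def _pick_primary_location(locations: list[str]) -> str | None:
--     """Retourne la 1ère location reconnue prioritaire, sinon la 1ère tout court.
--
--     Préférence : Brussels > Wallonie/LU > la première listée.
--     """
--     if not locations:
--         return None
--     preferred_keywords = ("brussels", "bruxelles")
--     good_keywords = ("nivelles", "liège", "liege", "luxembourg", "namur", "louvain")
--     for loc in locations:
--         if any(k in loc.lower() for k in preferred_keywords):
--             return loc
--     for loc in locations:
--         if any(k in loc.lower() for k in good_keywords):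
--             return loc
--     return locations[0]
-- ===== SOURCE B (Python) =====
-- def _pick_primary_location(locations: list[str]) -> str | None:
--     """Single pass: return first preferred match immediately, remember first good match."""
--     if not locations:
--         return None
--     preferred_keywords = ("brussels", "bruxelles")
--     good_keywords = ("nivelles", "li\u00e8ge", "liege", "luxembourg", "namur", "louvain")
--     first_good = None
--     for loc in locations:
--         low = loc.lower()
--         if any(k in low for k in preferred_keywords):
--             return loc
--         if first_good is None and any(k in low for k in good_keywords):
--             first_good = loc
--     return first_good if first_good is not None else locations[0]
-- ===== Notes on version B (the rewrite author's own statement) =====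
-- stated objective: alternative
-- what changed: Replaced A's two sequential scans (first for preferred keywords, then a second full scan for good keywords) by a single loop that returns a preferred match immediately while tracking the first good match in an accumulator.
import Mathlib
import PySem

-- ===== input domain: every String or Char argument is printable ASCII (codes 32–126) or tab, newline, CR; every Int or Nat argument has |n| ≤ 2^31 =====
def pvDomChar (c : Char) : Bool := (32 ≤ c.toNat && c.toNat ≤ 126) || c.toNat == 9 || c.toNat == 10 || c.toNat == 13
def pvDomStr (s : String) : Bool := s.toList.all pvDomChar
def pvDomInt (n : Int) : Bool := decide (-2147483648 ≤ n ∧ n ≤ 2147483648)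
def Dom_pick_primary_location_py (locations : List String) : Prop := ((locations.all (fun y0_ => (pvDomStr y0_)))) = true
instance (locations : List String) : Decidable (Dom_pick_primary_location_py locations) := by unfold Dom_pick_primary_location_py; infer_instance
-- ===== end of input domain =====

-- B replaces A's two sequential keyword scans by one pass that returns a preferred match
-- immediately and remembers the first good match as a fallback (objective: alternative).

-- shared keyword predicates (both Pythons test the same 'any(k in loc.lower() ...)')
def pvIsPref (loc : String) : Bool :=
  PySem.Str.isIn "brussels" (PySem.Str.lower loc) || PySem.Str.isIn "bruxelles" (PySem.Str.lower loc)

def pvIsGood (loc : String) : Bool :=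
  PySem.Str.isIn "nivelles" (PySem.Str.lower loc) || PySem.Str.isIn "liège" (PySem.Str.lower loc) ||
  PySem.Str.isIn "liege" (PySem.Str.lower loc) || PySem.Str.isIn "luxembourg" (PySem.Str.lower loc) ||
  PySem.Str.isIn "namur" (PySem.Str.lower loc) || PySem.Str.isIn "louvain" (PySem.Str.lower loc)

-- ===== PORT A =====
-- two sequential scans: first loop = find? pvIsPref, second loop = find? pvIsGood, then locations[0]
def pick_primary_location_py (locations : List String) : Option String :=
  match locations with
  | [] => none
  | l0 :: _ =>
    match locations.find? pvIsPref with
    | some l => some l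
    | none =>
      match locations.find? pvIsGood with
      | some l => some l
      | none => some l0

-- ===== PORT B =====
-- one pass: 'return loc' on preferred (some), else thread first_good; afterwards fallback to locations[0]
def pvLoopB (ls : List String) (first_good : Option String) : Option String :=
  match ls with
  | [] => first_good
  | loc :: rest =>
    if pvIsPref loc then some loc
    else pvLoopB rest (if first_good.isNone && pvIsGood loc then some loc else first_good)

def pick_primary_location_py_alt (locations : List String) : Option String :=
  match locations with
  | [] => none
  | l0 :: _ => some ((pvLoopB locations none).getD l0)

-- ===== PRECONDITION & SPEC =====
def Spec_pick_primary_location_py (locations : List String) (out : Option String) : Prop := out = pick_primary_location_py_alt locations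
instance (locations : List String) (out : Option String) : Decidable (Spec_pick_primary_location_py locations out) := by unfold Spec_pick_primary_location_py; infer_instance

-- ===== CLAIM (what is proved, stated in full; the proofs are below) =====
def Claim_equal_pick_primary_location_py : Prop := ∀ (locations : List String), Dom_pick_primary_location_py locations → Spec_pick_primary_location_py locations (pick_primary_location_py locations)

-- ===== LEMMAS AND PROOFS =====
theorem pvLoopB_eq (ls : List String) (fg : Option String) :
    pvLoopB ls fg =
      match ls.find? pvIsPref with
      | some l => some l
      | none => match fg with
        | some g => some g
        | none => ls.find? pvIsGood := by
  induction ls generalizing fg with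
  | nil => cases fg <;> simp [pvLoopB]
  | cons loc rest ih =>
    simp only [pvLoopB, List.find?]
    by_cases hp : pvIsPref loc
    · simp [hp]
    · simp only [hp, if_neg, Bool.false_eq_true, not_false_eq_true]
      rw [ih]
      cases fg with
      | some g => simp
      | none =>
        by_cases hg : pvIsGood loc <;> simp [hg]

-- ===== VERDICT (by name: the statement is the Claim_ definition above) =====
theorem pick_primary_location_py_spec : Claim_equal_pick_primary_location_py := by
  intro locations _
  unfold Spec_pick_primary_location_py pick_primary_location_py pick_primary_location_py_alt
  cases locations with
  | nil => rfl
  | cons l0 rest =>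
    rw [pvLoopB_eq]
    cases hp : (l0 :: rest).find? pvIsPref with
    | some l => simp
    | none =>
      cases hg : (l0 :: rest).find? pvIsGood with
      | some l => simp
      | none => simp
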